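-- pv_equiv track=rewrite | github.com/Limush/TPSG | ТПСГ ЛР2.py | generate_PSP2
-- ===== SOURCE A (Python) =====
-- def generate_PSP2(a2, x0, a1, b, m, numbers):
--     PSP = [x0]
--     count = 0
--     while count != numbers:
--         x_next = (a2*PSP[-1]**2 + a1*PSP[-1] + b) % m
--         PSP.append(x_next)
--         count += 1
--     return PSP
-- ===== SOURCE B (Python) =====
-- def generate_PSP2(a2, x0, a1, b, m, numbers):
--     # Cycle detection: the next value depends only on the current one, so the
--     # sequence is eventually periodic.  Record the first index of each value;
--     # on a repeat, fill the rest of the output by repeating the detected cycle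
--     # instead of re-running the recurrence.
--     seen = {}
--     seq = []
--     x = x0
--     while True:
--         if x in seen:
--             start = seen[x]
--             period = len(seq) - start
--             rem = numbers + 1 - len(seq)
--             cycle = seq[start:len(seq)]
--             seq = seq + cycle * (rem // period) + cycle[:rem % period]
--             return seq
--         seen[x] = len(seq)
--         seq.append(x)
--         if len(seq) > numbers:
--             return seq
--         x = (a2 * x * x + a1 * x + b) % m
-- ===== Notes on version B (the rewrite author's own statement) =====
-- stated objective: faster
-- what changed: B detects the cycle of the deterministic quadratic recurrence with a first-occurrence index dictionary and fills the remaining output by repeating the detected cycle (list multiplication plus a sliced remainder), instead of A's while-loop that re-runs the recurrence on PSP[-1] for every element; Pre_ excludes numbers < 0 (A loops forever) and m == 0 with numbers > 0 (A raises ZeroDivisionError).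
import Mathlib
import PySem

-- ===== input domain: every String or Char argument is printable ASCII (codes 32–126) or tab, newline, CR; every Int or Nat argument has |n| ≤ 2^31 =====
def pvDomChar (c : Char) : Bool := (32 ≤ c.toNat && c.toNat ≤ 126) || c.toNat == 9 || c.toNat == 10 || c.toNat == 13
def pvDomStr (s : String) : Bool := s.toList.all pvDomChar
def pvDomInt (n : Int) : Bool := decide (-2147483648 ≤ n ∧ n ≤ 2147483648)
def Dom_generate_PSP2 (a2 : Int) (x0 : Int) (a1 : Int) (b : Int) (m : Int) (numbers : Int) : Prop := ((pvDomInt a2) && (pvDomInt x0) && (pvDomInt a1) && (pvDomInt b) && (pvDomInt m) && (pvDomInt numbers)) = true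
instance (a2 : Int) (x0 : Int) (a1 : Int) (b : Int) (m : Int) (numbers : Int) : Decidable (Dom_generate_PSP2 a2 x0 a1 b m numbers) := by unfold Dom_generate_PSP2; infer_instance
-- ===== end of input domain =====

-- B replaces A's step-by-step while-loop with cycle detection: it records the first index of
-- each value in a dict and, on a repeat, fills the rest of the output by repeating the
-- detected cycle; return-value equivalence is proved on Pre_ (numbers >= 0, m != 0 unless numbers = 0).

-- ===== PORT A =====
-- A's while-loop: runs until count == numbers, appending (a2*PSP[-1]^2 + a1*PSP[-1] + b) % m.
-- Fuel = numbers.toNat: for numbers >= 0 this is exactly A's iteration count (numbers < 0,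
-- where Python A loops forever, is outside Pre_).
def generate_PSP2_go (a2 : Int) (a1 : Int) (b : Int) (m : Int) : Nat → List Int → List Int
  | 0, PSP => PSP
  | n + 1, PSP =>
      let last := (PySem.List.pyGet? PSP (-1)).getD 0
      let x_next := PySem.Int.mod (a2 * last ^ 2 + a1 * last + b) m
      generate_PSP2_go a2 a1 b m n (PSP ++ [x_next])

def generate_PSP2 (a2 : Int) (x0 : Int) (a1 : Int) (b : Int) (m : Int) (numbers : Int) : List Int :=
  generate_PSP2_go a2 a1 b m numbers.toNat [x0]

-- ===== PORT B =====
-- B's step function x -> (a2*x*x + a1*x + b) % m.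
def pvStep (a2 : Int) (a1 : Int) (b : Int) (m : Int) (x : Int) : Int :=
  PySem.Int.mod (a2 * x * x + a1 * x + b) m

-- B's 'while True' loop. Each iteration either returns or appends one element, and the loop
-- returns as soon as len(seq) > numbers, so fuel = numbers.toNat + 1 is exactly enough;
-- the fuel-0 branch is unreachable (fuel only makes the recursion structural).
def generate_PSP2_alt_loop (a2 : Int) (a1 : Int) (b : Int) (m : Int) (numbers : Int) :
    Nat → PySem.Dict Int Int → List Int → Int → List Int
  | 0, _, seq, _ => seq
  | fuel + 1, seen, seq, x =>
      match PySem.Dict.get? seen x with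
      | some start =>
          let L : Int := seq.length
          let period := L - start
          let rem := numbers + 1 - L
          let cycle := PySem.List.slice seq (some start) (some L)
          seq ++ PySem.List.pyRepeat cycle (PySem.Int.floordiv rem period)
              ++ PySem.List.slice cycle none (some (PySem.Int.mod rem period))
      | none =>
          let seen' := seen.insert x (seq.length : Int)
          let seq' := seq ++ [x]
          if (seq'.length : Int) > numbers then seq'
          else generate_PSP2_alt_loop a2 a1 b m numbers fuel seen' seq' (pvStep a2 a1 b m x)

def generate_PSP2_alt (a2 : Int) (x0 : Int) (a1 : Int) (b : Int) (m : Int) (numbers : Int) : List Int :=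
  generate_PSP2_alt_loop a2 a1 b m numbers (numbers.toNat + 1) PySem.Dict.empty [] x0

-- ===== PRECONDITION & SPEC =====
-- Pre_ excludes numbers < 0 (A's while-loop never terminates) and m = 0 with numbers > 0
-- (A raises ZeroDivisionError); on both, A returns no value.
def Pre_generate_PSP2 (a2 : Int) (x0 : Int) (a1 : Int) (b : Int) (m : Int) (numbers : Int) : Prop :=
  0 ≤ numbers ∧ (numbers = 0 ∨ m ≠ 0)
instance (a2 : Int) (x0 : Int) (a1 : Int) (b : Int) (m : Int) (numbers : Int) : Decidable (Pre_generate_PSP2 a2 x0 a1 b m numbers) := by unfold Pre_generate_PSP2; infer_instance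

def pvWitness_generate_PSP2 : Int × Int × Int × Int × Int × Int := (3, 5, 2, 7, 11, 4)

def Spec_generate_PSP2 (a2 : Int) (x0 : Int) (a1 : Int) (b : Int) (m : Int) (numbers : Int) (out : List Int) : Prop := out = generate_PSP2_alt a2 x0 a1 b m numbers
instance (a2 : Int) (x0 : Int) (a1 : Int) (b : Int) (m : Int) (numbers : Int) (out : List Int) : Decidable (Spec_generate_PSP2 a2 x0 a1 b m numbers out) := by unfold Spec_generate_PSP2; infer_instance

-- ===== CLAIM (what is proved, stated in full; the proofs are below) =====
def Claim_equal_generate_PSP2 : Prop := ∀ (a2 : Int) (x0 : Int) (a1 : Int) (b : Int) (m : Int) (numbers : Int), Dom_generate_PSP2 a2 x0 a1 b m numbers → Pre_generate_PSP2 a2 x0 a1 b m numbers → Spec_generate_PSP2 a2 x0 a1 b m numbers (generate_PSP2 a2 x0 a1 b m numbers)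

-- ===== LEMMAS AND PROOFS =====

-- The n-th value of the sequence: n-fold iteration of the step function on x0.
def pvS (a2 : Int) (a1 : Int) (b : Int) (m : Int) (x0 : Int) (i : Nat) : Int :=
  (pvStep a2 a1 b m)^[i] x0

theorem pvS_succ (a2 a1 b m x0 : Int) (i : Nat) :
    pvS a2 a1 b m x0 (i + 1) = pvStep a2 a1 b m (pvS a2 a1 b m x0 i) := by
  simp [pvS, Function.iterate_succ_apply']

-- A's loop produces the map of pvS over an initial segment.
theorem go_eq_map (a2 a1 b m x0 : Int) (n : Nat) (t : Nat) :
    generate_PSP2_go a2 a1 b m n ((List.range (t+1)).map (pvS a2 a1 b m x0) )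
      = (List.range (t + 1 + n)).map (pvS a2 a1 b m x0) := by
  induction n generalizing t with
  | zero => simp [generate_PSP2_go]
  | succ k ih =>
      have hlast : (PySem.List.pyGet? ((List.range (t+1)).map (pvS a2 a1 b m x0)) (-1)).getD 0
          = pvS a2 a1 b m x0 t := by
        rw [List.range_succ]
        simp [PySem.List.pyGet?, PySem.List.pyIdx?]
      simp only [generate_PSP2_go, hlast]
      have hstep : PySem.Int.mod (a2 * (pvS a2 a1 b m x0 t) ^ 2 + a1 * (pvS a2 a1 b m x0 t) + b) m
          = pvS a2 a1 b m x0 (t + 1) := by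
        rw [pvS_succ]
        unfold pvStep
        ring_nf
      rw [hstep]
      have hone : (List.range (t+1)).map (pvS a2 a1 b m x0) ++ [pvS a2 a1 b m x0 (t+1)]
          = (List.range (t+2)).map (pvS a2 a1 b m x0) := by
        rw [List.range_succ (n := t+1)]; simp
      rw [hone, ih (t + 1)]
      have harr : t + 1 + 1 + k = t + 1 + (k + 1) := by omega
      rw [harr]

theorem A_eq_map (a2 x0 a1 b m numbers : Int) :
    generate_PSP2 a2 x0 a1 b m numbers
      = (List.range (numbers.toNat + 1)).map (pvS a2 a1 b m x0) := by
  unfold generate_PSP2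
  have h0 : ([x0] : List Int) = (List.range 1).map (pvS a2 a1 b m x0) := by
    simp [pvS]
  rw [h0, go_eq_map a2 a1 b m x0 numbers.toNat 0]
  have harr : 0 + 1 + numbers.toNat = numbers.toNat + 1 := by omega
  rw [harr]

-- Repeating one cycle of a periodic function reproduces its map over a longer range.
theorem periodic_range (T : Nat → Int) (p : Nat) (hper : ∀ k, T (p + k) = T k) (q r : Nat) :
    (List.range (q * p + r)).map T
      = (List.replicate q ((List.range p).map T)).flatten ++ (List.range r).map T := by
  induction q with
  | zero => simp
  | succ k ih =>
      have harr : (k+1) * p + r = p + (k * p + r) := by ring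
      rw [harr, List.range_add, List.map_append, List.map_map]
      have hshift : (List.range (k * p + r)).map (T ∘ (p + ·)) = (List.range (k * p + r)).map T := by
        apply List.map_congr_left
        intro i _
        exact hper i
      rw [hshift, ih, List.replicate_succ, List.flatten_cons, List.append_assoc]

-- B's loop invariant: with seq the first t values, x the t-th value and every dict entry a
-- correct earlier index, the loop produces the full first numbers+1 values.
theorem alt_loop_eq (a2 a1 b m x0 : Int) (N : Nat) :
   ∀ (fuel t : Nat) (seen : PySem.Dict Int Int),
    N + 1 ≤ fuel + t →
    t ≤ N →
    (∀ v j, PySem.Dict.get? seen v = some j →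
      ∃ jn : Nat, j = (jn : Int) ∧ jn < t ∧ pvS a2 a1 b m x0 jn = v) →
    generate_PSP2_alt_loop a2 a1 b m (N : Int) fuel seen
        ((List.range t).map (pvS a2 a1 b m x0)) (pvS a2 a1 b m x0 t)
      = (List.range (N + 1)).map (pvS a2 a1 b m x0) := by
  intro fuel
  induction fuel with
  | zero => intro t seen hfuel ht _; omega
  | succ f ih =>
      intro t seen hfuel ht hseen
      set S := pvS a2 a1 b m x0 with hS
      rw [generate_PSP2_alt_loop]
      cases hget : PySem.Dict.get? seen (S t) with
      | some start =>
          obtain ⟨jn, rfl, hjt, hSj⟩ := hseen _ _ hget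
          simp only []
          set p : Nat := t - jn with hp
          have hppos : 0 < p := by omega
          set rem' : Nat := N + 1 - t with hrem
          have hremp : 0 < rem' := by omega
          have hlen : (((List.range t).map S).length : Int) = (t : Int) := by simp
          have hperiod : (((List.range t).map S).length : Int) - (jn : Int) = ((p : Nat) : Int) := by
            rw [List.length_map, List.length_range]; push_cast; omega
          have hremI : (N : Int) + 1 - (((List.range t).map S).length : Int) = ((rem' : Nat) : Int) := by
            rw [List.length_map, List.length_range]; push_cast; omega
          rw [hperiod, hremI]
          -- the slice is the cycle  map S (range' jn p)
          have hslice : PySem.List.slice ((List.range t).map S) (some (jn : Int))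
              (some ((((List.range t).map S).length : Nat) : Int))
              = (List.range' jn p).map S := by
            rw [PySem.List.slice_natCast]
            rw [← List.map_drop]
            rw [List.range_eq_range' (n := t), List.drop_range']
            simp only [Nat.zero_add, Nat.mul_one]
            rw [List.take_of_length_le (by simp)]
          rw [hslice]
          rw [PySem.Int.floordiv_natCast rem' p, PySem.Int.mod_natCast rem' p]
          rw [PySem.List.slice_to_natCast]
          -- periodic shifted function T k = S (jn + k)
          set T : Nat → Int := fun k => S (jn + k) with hT
          have hSt : S t = S (jn + p) := by congr 1; omega
          have hperT : ∀ k, T (p + k) = T k := by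
            intro k
            show S (jn + (p + k)) = S (jn + k)
            have h1 : S (jn + (p + k)) = (pvStep a2 a1 b m)^[k] (S (jn + p)) := by
              simp only [hS, pvS]
              rw [← Function.iterate_add_apply]
              congr 1
              omega
            have h2 : S (jn + k) = (pvStep a2 a1 b m)^[k] (S jn) := by
              simp only [hS, pvS]
              rw [← Function.iterate_add_apply]
              congr 1
              omega
            rw [h1, h2, ← hSt, hSj]
          have hcycle : (List.range' jn p).map S = (List.range p).map T := by
            rw [List.range'_eq_map_range, List.map_map]
            rfl
          have htail : (List.range (N + 1)).map S
              = (List.range t).map S ++ (List.range rem').map T := by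
            have hsplit : N + 1 = t + rem' := by omega
            rw [hsplit, List.range_add, List.map_append, List.map_map]
            congr 1
            apply List.map_congr_left
            intro i _
            show S (t + i) = T i
            calc S (t + i) = T (p + i) := by
                  show S (t + i) = S (jn + (p + i))
                  congr 1
                  omega
              _ = T i := hperT i
          rw [htail, hcycle, List.append_assoc]
          have hdiv : rem' = rem' / p * p + rem' % p := by
            rw [Nat.mul_comm]
            exact (Nat.div_add_mod rem' p).symm
          have hdecomp : (List.range rem').map T
              = (List.replicate (rem' / p) ((List.range p).map T)).flatten
                ++ (List.range (rem' % p)).map T := by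
            conv_lhs => rw [hdiv]
            exact periodic_range T p hperT (rem' / p) (rem' % p)
          have hrep : PySem.List.pyRepeat ((List.range p).map T) (((rem' / p : Nat)) : Int)
              = (List.replicate (rem' / p) ((List.range p).map T)).flatten := by
            simp only [PySem.List.pyRepeat, Int.toNat_natCast]
          have htake : List.take (rem' % p) ((List.range p).map T)
              = (List.range (rem' % p)).map T := by
            rw [← List.map_take, List.take_range]
            congr 2
            have := Nat.mod_lt rem' hppos
            omega
          rw [hdecomp, hrep, htake]
      | none =>
          simp only []
          have hlen' : ((((List.range t).map S) ++ [S t]).length : Int) = ((t : Nat) : Int) + 1 := by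
            simp
          have happ : ((List.range t).map S) ++ [S t] = (List.range (t+1)).map S := by
            rw [List.range_succ]; simp
          by_cases hcase : ((((List.range t).map S) ++ [S t]).length : Int) > (N : Int)
          · rw [if_pos hcase, happ]
            have heq : t = N := by
              rw [hlen'] at hcase
              omega
            rw [heq]
          · rw [if_neg hcase]
            rw [hlen'] at hcase
            have ht1 : t + 1 ≤ N := by omega
            have hstep : pvStep a2 a1 b m (S t) = S (t + 1) := (pvS_succ a2 a1 b m x0 t).symm
            rw [happ, hstep]
            apply ih (t + 1)
            · omega
            · exact ht1
            · intro v j hj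
              rw [PySem.Dict.get?_insert] at hj
              by_cases hv : v = S t
              · rw [if_pos hv] at hj
                refine ⟨t, ?_, by omega, hv ▸ rfl⟩
                injection hj with hj'
                rw [← hj']
                simp
              · rw [if_neg hv] at hj
                obtain ⟨jn, rfl, hlt, hSj⟩ := hseen v j hj
                exact ⟨jn, rfl, by omega, hSj⟩

-- ===== VERDICT (by name: the statement is the Claim_ definition above) =====
theorem generate_PSP2_spec : Claim_equal_generate_PSP2 := by
  intro a2 x0 a1 b m numbers _ hpre
  obtain ⟨hnn, _⟩ := hpre
  unfold Spec_generate_PSP2 generate_PSP2_alt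
  set N : Nat := numbers.toNat with hNdef
  have hNI : (numbers : Int) = (N : Int) := by omega
  rw [A_eq_map, hNI]
  have h := alt_loop_eq a2 a1 b m x0 N (N + 1) 0 PySem.Dict.empty
    (by omega) (by omega)
    (by intro v j hj; rw [PySem.Dict.get?_empty] at hj; cases hj)
  simpa using h.symm
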